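-- pv_equiv track=rewrite | github.com/Defilegm/lesson_3 | quest_5.py | f
-- ===== SOURCE A (Python) =====
-- def f(n):
--     list=[0,1]
--     list1=[]
--     for i in range(n):
--         list.append(list[i] + list[i+1])
--     for i in range(n+1):
--         list1.append((-1)**(i+2)*(list[i+1]))
--     list1.reverse()
--     list1.extend(list)
--     return list1
-- ===== SOURCE B (Python) =====
-- def f(n):
--     fib = [0, 1]
--     for _ in range(n):
--         fib.append(fib[-2] + fib[-1])
--     prefix = []
--     a, b = 0, 1
--     for _ in range(n + 1):
--         a, b = b - a, a
--         prefix.insert(0, a)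
--     return prefix + fib
-- ===== Notes on version B (the rewrite author's own statement) =====
-- stated objective: alternative
-- what changed: B derives the negative-index Fibonacci prefix by the backward subtraction recurrence with front insertion, instead of A's alternating-sign power multiplication over the forward list followed by an explicit reverse; the forward list is grown from its last two elements instead of by positional indexing.
import Mathlib
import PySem

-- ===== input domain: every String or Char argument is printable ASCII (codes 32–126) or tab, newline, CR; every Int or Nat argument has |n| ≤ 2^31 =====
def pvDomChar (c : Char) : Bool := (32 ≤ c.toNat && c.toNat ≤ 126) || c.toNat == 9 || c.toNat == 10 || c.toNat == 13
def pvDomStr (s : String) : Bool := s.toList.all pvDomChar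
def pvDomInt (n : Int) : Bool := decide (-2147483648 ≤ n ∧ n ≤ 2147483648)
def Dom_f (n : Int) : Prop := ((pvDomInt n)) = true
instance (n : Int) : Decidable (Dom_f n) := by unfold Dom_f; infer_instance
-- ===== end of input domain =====

-- B replaces A's alternating-sign power multiplication over the forward Fibonacci list plus an
-- explicit reverse by the backward subtraction recurrence with front insertion
-- (objective: alternative; same results, proved equal for all n in Dom).

-- ===== PORT A =====
def f (n : Int) : List Int :=
  let list := (PySem.List.pyRange 0 n 1).foldl
      (fun l i => l ++ [PySem.List.pyGetD l i 0 + PySem.List.pyGetD l (i + 1) 0]) [0, 1]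
  let list1 := (PySem.List.pyRange 0 (n + 1) 1).foldl
      (fun l1 i => l1 ++ [(-1 : Int) ^ (i + 2).toNat * PySem.List.pyGetD list (i + 1) 0]) []
  list1.reverse ++ list

-- ===== PORT B =====
def f_alt (n : Int) : List Int :=
  let fib := (PySem.List.pyRange 0 n 1).foldl
      (fun l _ => l ++ [PySem.List.pyGetD l (-2) 0 + PySem.List.pyGetD l (-1) 0]) [0, 1]
  let st := (PySem.List.pyRange 0 (n + 1) 1).foldl
      (fun (p : List Int × Int × Int) _ => ((p.2.2 - p.2.1) :: p.1, p.2.2 - p.2.1, p.2.1))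
      (([] : List Int), (0 : Int), (1 : Int))
  st.1 ++ fib

-- ===== PRECONDITION & SPEC =====
def Spec_f (n : Int) (out : List Int) : Prop := out = f_alt n
instance (n : Int) (out : List Int) : Decidable (Spec_f n out) := by unfold Spec_f; infer_instance

-- ===== CLAIM (what is proved, stated in full; the proofs are below) =====
def Claim_equal_f : Prop := ∀ (n : Int), Dom_f n → Spec_f n (f n)

-- ===== LEMMAS AND PROOFS =====

-- standard Fibonacci numbers as integers
def fibI : Nat → Int
  | 0 => 0
  | 1 => 1
  | k + 2 => fibI k + fibI (k + 1)

-- the forward list [F_0, ..., F_{m+1}]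
def fibList (m : Nat) : List Int := (List.range (m + 2)).map fibI

-- F_{-k} (negative-index Fibonacci)
def nf (k : Nat) : Int := (-1 : Int) ^ (k + 1) * fibI k

lemma pyRange_zero_succ (m : Nat) :
    PySem.List.pyRange 0 ((m : Int) + 1) 1 = PySem.List.pyRange 0 (m : Int) 1 ++ [(m : Int)] := by
  exact PySem.List.pyRange_one_succ_right (by omega)

lemma fibList_succ (m : Nat) : fibList (m + 1) = fibList m ++ [fibI (m + 2)] := by
  simp [fibList, List.range_succ]

lemma fibList_length (m : Nat) : (fibList m).length = m + 2 := by
  simp [fibList]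

-- A's first loop builds fibList
lemma A1 (m : Nat) :
    (PySem.List.pyRange 0 (m : Int) 1).foldl
      (fun l i => l ++ [PySem.List.pyGetD l i 0 + PySem.List.pyGetD l (i + 1) 0]) [0, 1]
    = fibList m := by
  induction m with
  | zero => rfl
  | succ m ih =>
      rw [show ((m + 1 : Nat) : Int) = (m : Int) + 1 by push_cast; ring,
          pyRange_zero_succ, List.foldl_append, ih]
      simp only [List.foldl_cons, List.foldl_nil]
      have h1 : PySem.List.pyGetD (fibList m) (m : Int) 0 = fibI m := by
        rw [PySem.List.pyGetD_natCast]
        exact PySem.List.getD_map_range fibI (m + 2) m 0 (by omega)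
      have h2 : PySem.List.pyGetD (fibList m) ((m : Int) + 1) 0 = fibI (m + 1) := by
        rw [show ((m : Int) + 1) = ((m + 1 : Nat) : Int) by push_cast; ring,
            PySem.List.pyGetD_natCast]
        exact PySem.List.getD_map_range fibI (m + 2) (m + 1) 0 (by omega)
      rw [h1, h2, fibList_succ]
      rfl

-- B's first loop builds fibList too
lemma B1 (m : Nat) :
    (PySem.List.pyRange 0 (m : Int) 1).foldl
      (fun l _ => l ++ [PySem.List.pyGetD l (-2) 0 + PySem.List.pyGetD l (-1) 0]) [0, 1]
    = fibList m := by
  induction m with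
  | zero => rfl
  | succ m ih =>
      rw [show ((m + 1 : Nat) : Int) = (m : Int) + 1 by push_cast; ring,
          pyRange_zero_succ, List.foldl_append, ih]
      simp only [List.foldl_cons, List.foldl_nil]
      rw [PySem.List.pyGetD_neg_ofNat (fibList m) 2 0 (by omega) (by rw [fibList_length]; omega),
          PySem.List.pyGetD_neg_ofNat (fibList m) 1 0 (by omega) (by rw [fibList_length]; omega),
          fibList_succ]
      congr 1
      have hlen : (fibList m).length = m + 2 := fibList_length m
      have e2 : (fibList m)[(fibList m).length - 2]'(by omega) = fibI m := by
        simp [fibList, ]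
      have e1 : (fibList m)[(fibList m).length - 1]'(by omega) = fibI (m + 1) := by
        simp [fibList, ]
      simp only [e1, e2]
      rfl

-- A's second loop collects [F_{-1}, ..., F_{-m}] (to be reversed)
lemma A2 (N m : Nat) (h : m ≤ N + 1) :
    (PySem.List.pyRange 0 (m : Int) 1).foldl
      (fun l1 i => l1 ++ [(-1 : Int) ^ (i + 2).toNat * PySem.List.pyGetD (fibList N) (i + 1) 0]) []
    = (List.range m).map (fun j => nf (j + 1)) := by
  induction m with
  | zero => rfl
  | succ m ih =>
      rw [show ((m + 1 : Nat) : Int) = (m : Int) + 1 by push_cast; ring,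
          pyRange_zero_succ, List.foldl_append, ih (by omega)]
      simp only [List.foldl_cons, List.foldl_nil]
      rw [List.range_succ, List.map_append]
      congr 1
      have hg : PySem.List.pyGetD (fibList N) ((m : Int) + 1) 0 = fibI (m + 1) := by
        rw [show ((m : Int) + 1) = ((m + 1 : Nat) : Int) by push_cast; ring,
            PySem.List.pyGetD_natCast]
        exact PySem.List.getD_map_range fibI (N + 2) (m + 1) 0 (by omega)
      rw [hg, show ((m : Int) + 2).toNat = m + 2 by omega]
      simp [nf]

lemma nf_succ (m : Nat) : nf (m + 1) = (if m = 0 then (1 : Int) else nf (m - 1)) - nf m := by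
  cases m with
  | zero => simp [nf, fibI]
  | succ k =>
      simp only [Nat.succ_sub_one, if_neg (Nat.succ_ne_zero k)]
      show nf (k + 2) = nf k - nf (k + 1)
      simp [nf, fibI, pow_succ]
      ring

-- B's second loop produces the same prefix, already reversed, by back-subtraction
lemma B2 (m : Nat) :
    (PySem.List.pyRange 0 (m : Int) 1).foldl
      (fun (p : List Int × Int × Int) _ => ((p.2.2 - p.2.1) :: p.1, p.2.2 - p.2.1, p.2.1))
      (([] : List Int), (0 : Int), (1 : Int))
    = (((List.range m).map (fun j => nf (j + 1))).reverse,
       nf m, if m = 0 then 1 else nf (m - 1)) := by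
  induction m with
  | zero => rfl
  | succ m ih =>
      rw [show ((m + 1 : Nat) : Int) = (m : Int) + 1 by push_cast; ring,
          pyRange_zero_succ, List.foldl_append, ih]
      simp only [List.foldl_cons, List.foldl_nil, List.range_succ, List.map_append,
        List.reverse_append, List.map_cons, List.map_nil, List.reverse_cons, List.reverse_nil,
        List.nil_append, List.cons_append, Nat.succ_ne_zero, if_false, Nat.succ_sub_one]
      rw [nf_succ]

-- ===== VERDICT (by name: the statement is the Claim_ definition above) =====
theorem f_spec : Claim_equal_f := by
  intro n _
  unfold Spec_f f f_alt
  rcases lt_or_ge n 0 with hn | hn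
  · rw [PySem.List.pyRange_one_eq_nil (by omega : n ≤ 0),
        PySem.List.pyRange_one_eq_nil (by omega : n + 1 ≤ 0)]
    rfl
  · obtain ⟨N, rfl⟩ := Int.eq_ofNat_of_zero_le hn
    rw [show ((N : Int) + 1) = ((N + 1 : Nat) : Int) by push_cast; ring]
    simp only []
    rw [A1 N, B1 N, A2 N (N + 1) (by omega), B2 (N + 1)]
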